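-- pv_equiv track=rewrite | github.com/GakuruAlex/all_climb_stairs | all_ways.py | all_ways_up
-- ===== SOURCE A (Python) =====
-- from typing import List, Dict
--
-- def all_ways_up(stairs: int, steps: List[int]) -> List[List[int]]:
--     """_Find all the ways up a given number of stairs and given steps to take each time_
--
--     Args:
--         stairs (int): _Number of stairs_
--         steps (List[int]): _steps you are allowed to take at a time_
--
--     Returns:
--         List[List[int]]: _A list of all the ways to get to the top_
--     """
--     all_ways: List[List[int]] = []
--     if stairs < 0:
--         return None
--     if stairs == 0:
--         return [[]]
--     for step in steps:
--         new_stairs: int = stairs - step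
--
--         result: List[int]= all_ways_up(stairs= new_stairs, steps= steps)
--         if result != None:
--             list(map(lambda value: value.append(step), result))
--             all_ways.extend(result)
--     return all_ways
-- ===== SOURCE B (Python) =====
-- from typing import List
--
-- def all_ways_up(stairs: int, steps: List[int]) -> List[List[int]]:
--     if stairs < 0:
--         return None
--     ways: List[List[List[int]]] = [[[]]]
--     for i in range(1, stairs + 1):
--         cur: List[List[int]] = []
--         for step in steps:
--             if i - step >= 0:
--                 for comp in ways[i - step]:
--                     cur.append(comp + [step])
--         ways.append(cur)
--     return ways[stairs]
-- ===== Notes on version B (the rewrite author's own statement) =====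
-- stated objective: alternative
-- what changed: Replaces A's top-down recursion (re-solving each sub-stair from scratch) with a bottom-up dynamic-programming table indexed 0..stairs, filling ways[i] once from already computed smaller entries.
import Mathlib
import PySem

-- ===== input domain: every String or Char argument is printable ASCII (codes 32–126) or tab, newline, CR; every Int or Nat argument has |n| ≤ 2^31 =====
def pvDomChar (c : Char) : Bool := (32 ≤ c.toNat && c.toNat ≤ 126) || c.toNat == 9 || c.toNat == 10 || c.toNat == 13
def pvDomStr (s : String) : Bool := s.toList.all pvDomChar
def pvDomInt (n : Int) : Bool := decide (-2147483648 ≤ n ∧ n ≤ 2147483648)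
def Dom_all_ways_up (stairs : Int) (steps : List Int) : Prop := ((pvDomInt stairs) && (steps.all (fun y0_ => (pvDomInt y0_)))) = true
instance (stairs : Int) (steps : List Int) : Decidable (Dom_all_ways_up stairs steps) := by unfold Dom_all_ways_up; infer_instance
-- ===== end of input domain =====

-- B replaces A's top-down recursion by a bottom-up DP table indexed 0..stairs (objective: alternative).

-- ===== PORT A =====
-- A is recursive on `stairs`; the fuel `stairs.toNat` only makes the recursion total in Lean
-- (under Pre_ every recursive call decreases `stairs` by at least 1, so fuel is never exhausted).
def all_ways_upF (fuel : Nat) (stairs : Int) (steps : List Int) : Option (List (List Int)) :=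
  if stairs < 0 then none
  else if stairs = 0 then some [[]]
  else
    match fuel with
    | 0 => none
    | f + 1 =>
      some (steps.foldl (fun all_ways step =>
        match all_ways_upF f (stairs - step) steps with
        | none => all_ways
        | some result => all_ways ++ result.map (fun value => value ++ [step])) [])

def all_ways_up (stairs : Int) (steps : List Int) : Option (List (List Int)) :=
  all_ways_upF stairs.toNat stairs steps

-- ===== PORT B =====
-- `ways[i - step]` / `ways[stairs]` are ported with pyGetD: under Pre_ every index is in range.
def all_ways_up_alt (stairs : Int) (steps : List Int) : Option (List (List Int)) :=
  if stairs < 0 then none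
  else
    let ways := (PySem.List.pyRange 1 (stairs + 1) 1).foldl (fun ways i =>
      ways ++ [steps.foldl (fun cur step =>
        if i - step ≥ 0 then
          cur ++ (PySem.List.pyGetD ways (i - step) []).map (fun comp => comp ++ [step])
        else cur) []]) [[[]]]
    some (PySem.List.pyGetD ways stairs [])

-- ===== PRECONDITION & SPEC =====
-- Pre_ excludes only inputs where A never returns: with stairs > 0 and some step ≤ 0 the
-- recursion `all_ways_up(stairs - step)` never reaches a base case (RecursionError);
-- B raises an IndexError there too.
def Pre_all_ways_up (stairs : Int) (steps : List Int) : Prop :=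
  stairs ≤ 0 ∨ ∀ s ∈ steps, 0 < s
instance (stairs : Int) (steps : List Int) : Decidable (Pre_all_ways_up stairs steps) := by
  unfold Pre_all_ways_up; infer_instance

def pvWitness_all_ways_up : Int × List Int := (4, [1, 2])

def Spec_all_ways_up (stairs : Int) (steps : List Int) (out : Option (List (List Int))) : Prop := out = all_ways_up_alt stairs steps
instance (stairs : Int) (steps : List Int) (out : Option (List (List Int))) : Decidable (Spec_all_ways_up stairs steps out) := by unfold Spec_all_ways_up; infer_instance

-- ===== CLAIM (what is proved, stated in full; the proofs are below) =====
def Claim_equal_all_ways_up : Prop := ∀ (stairs : Int) (steps : List Int), Dom_all_ways_up stairs steps → Pre_all_ways_up stairs steps → Spec_all_ways_up stairs steps (all_ways_up stairs steps)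

-- ===== LEMMAS AND PROOFS =====

-- The DP table after processing rows 1..n, and its top row.
def pvTbl (steps : List Int) : Nat → List (List (List Int))
  | 0 => [[[]]]
  | n + 1 =>
    let w := pvTbl steps n
    w ++ [steps.foldl (fun cur step =>
      if ((n : Int) + 1) - step ≥ 0 then
        cur ++ (PySem.List.pyGetD w (((n : Int) + 1) - step) []).map (fun comp => comp ++ [step])
      else cur) []]

def pvEntry (steps : List Int) : Nat → List (List Int)
  | 0 => [[]]
  | n + 1 => steps.foldl (fun cur step =>
      if ((n : Int) + 1) - step ≥ 0 then
        cur ++ (PySem.List.pyGetD (pvTbl steps n) (((n : Int) + 1) - step) []).map (fun comp => comp ++ [step])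
      else cur) []

theorem pvTbl_succ (steps : List Int) (n : Nat) :
    pvTbl steps (n + 1) = pvTbl steps n ++ [pvEntry steps (n + 1)] := rfl

theorem pvTbl_length (steps : List Int) (n : Nat) : (pvTbl steps n).length = n + 1 := by
  induction n with
  | zero => rfl
  | succ n ih => simp [pvTbl_succ, ih]

theorem pvTbl_take (steps : List Int) (n m : Nat) (h : m ≤ n) :
    (pvTbl steps n).take (m + 1) = pvTbl steps m := by
  induction n with
  | zero => interval_cases m; rfl
  | succ n ih =>
    rcases Nat.lt_or_ge m (n + 1) with hm | hm
    · rw [pvTbl_succ, List.take_append_of_le_length (by rw [pvTbl_length]; omega)]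
      exact ih (by omega)
    · have : m = n + 1 := by omega
      subst this
      rw [List.take_of_length_le (by rw [pvTbl_length])]

theorem pvTbl_get (steps : List Int) (n m : Nat) (h : m ≤ n) :
    PySem.List.pyGetD (pvTbl steps n) (m : Int) [] = pvEntry steps m := by
  rw [PySem.List.pyGetD_natCast]
  have hget : (pvTbl steps n).getD m [] = ((pvTbl steps n).take (m + 1)).getD m [] := by
    have hlen : m < (pvTbl steps n).length := by rw [pvTbl_length]; omega
    simp [List.getD, hlen, List.getElem_take]
  rw [hget, pvTbl_take steps n m h]
  cases m with
  | zero => rfl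
  | succ k =>
    rw [pvTbl_succ]
    have hlen : (pvTbl steps k).length = k + 1 := pvTbl_length steps k
    simp [List.getD, ← hlen]

-- in-range version with an Int index
theorem pvTbl_get_int (steps : List Int) (n : Nat) (i : Int) (h0 : 0 ≤ i) (h : i ≤ (n : Int)) :
    PySem.List.pyGetD (pvTbl steps n) i [] = pvEntry steps i.toNat := by
  have : i = ((i.toNat : Nat) : Int) := by omega
  rw [this, pvTbl_get steps n i.toNat (by omega), Int.toNat_natCast]

-- B's fold over range(1, n+1) builds exactly pvTbl.
theorem pvB_fold (steps : List Int) (n : Nat) :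
    (PySem.List.pyRange 1 ((n : Int) + 1) 1).foldl (fun ways i =>
      ways ++ [steps.foldl (fun cur step =>
        if i - step ≥ 0 then
          cur ++ (PySem.List.pyGetD ways (i - step) []).map (fun comp => comp ++ [step])
        else cur) []]) [[[]]] = pvTbl steps n := by
  induction n with
  | zero => simp [PySem.List.pyRange_one_eq_nil (by omega : (1:Int) ≤ 1)]; rfl
  | succ n ih =>
    rw [show ((n : Nat) + 1 : Nat) = ((n : Nat) + 1) from rfl]
    have hsplit : PySem.List.pyRange 1 (((n + 1 : Nat) : Int) + 1) 1
        = PySem.List.pyRange 1 ((n : Int) + 1) 1 ++ [(n : Int) + 1] := by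
      push_cast
      rw [show ((n : Int) + 1 + 1) = ((n : Int) + 1) + 1 from rfl]
      exact PySem.List.pyRange_one_succ_right (by omega)
    rw [hsplit, List.foldl_append, ih]
    rfl

-- A's recursion computes pvEntry whenever all steps are positive and fuel ≥ stairs.
theorem pvA_eq (steps : List Int) (hpos : ∀ s ∈ steps, 0 < s) :
    ∀ (fuel : Nat) (m : Int), 0 ≤ m → m ≤ (fuel : Int) →
      all_ways_upF fuel m steps = some (pvEntry steps m.toNat) := by
  intro fuel
  induction fuel with
  | zero =>
    intro m h0 h1
    have : m = 0 := by omega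
    subst this
    rfl
  | succ f ih =>
    intro m h0 h1
    by_cases hm0 : m = 0
    · subst hm0; rfl
    · have hm1 : 1 ≤ m := by omega
      have hk : m = ((m.toNat - 1 : Nat) : Int) + 1 := by omega
      have hstep : all_ways_upF (f + 1) m steps = some (steps.foldl (fun all_ways step =>
          match all_ways_upF f (m - step) steps with
          | none => all_ways
          | some result => all_ways ++ result.map (fun value => value ++ [step])) []) := by
        rw [all_ways_upF.eq_def, if_neg (by omega), if_neg hm0]
      rw [hstep]
      congr 1
      have hE : pvEntry steps m.toNat = steps.foldl (fun cur step =>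
          if (((m.toNat - 1 : Nat) : Int) + 1) - step ≥ 0 then
            cur ++ (PySem.List.pyGetD (pvTbl steps (m.toNat - 1)) ((((m.toNat - 1 : Nat) : Int) + 1) - step) []).map (fun comp => comp ++ [step])
          else cur) [] := by
        have : m.toNat = (m.toNat - 1) + 1 := by omega
        rw [this]; rfl
      rw [hE]
      apply PySem.List.foldl_congr_mem
      intro acc step hstep
      have hs : 0 < step := hpos step hstep
      rw [← hk]
      by_cases hge : m - step ≥ 0
      · rw [if_pos hge]
        rw [ih (m - step) (by omega) (by omega)]
        rw [pvTbl_get_int steps (m.toNat - 1) (m - step) (by omega) (by omega)]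
      · rw [if_neg hge]
        have : all_ways_upF f (m - step) steps = none := by
          rw [all_ways_upF.eq_def, if_pos (by omega)]
        rw [this]

-- ===== VERDICT (by name: the statement is the Claim_ definition above) =====
theorem all_ways_up_spec : Claim_equal_all_ways_up := by
  intro stairs steps _ hpre
  unfold Spec_all_ways_up all_ways_up all_ways_up_alt
  by_cases hneg : stairs < 0
  · rw [if_pos hneg, all_ways_upF.eq_def, if_pos hneg]
  · rw [if_neg hneg]
    have h0 : 0 ≤ stairs := by omega
    rw [show stairs + 1 = ((stairs.toNat : Int)) + 1 by omega, pvB_fold steps stairs.toNat]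
    show all_ways_upF stairs.toNat stairs steps
        = some (PySem.List.pyGetD (pvTbl steps stairs.toNat) stairs [])
    rw [pvTbl_get_int steps stairs.toNat stairs h0 (by omega)]
    by_cases hz : stairs = 0
    · subst hz; rfl
    · have hpos : ∀ s ∈ steps, 0 < s := by
        rcases hpre with h | h
        · omega
        · exact h
      exact pvA_eq steps hpos stairs.toNat stairs h0 (by omega)
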